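-- pv_equiv track=rewrite | github.com/lian-david/Reversi | python week 2/test2_practice.py | generate_passwords
-- ===== SOURCE A (Python) =====
-- def generate_passwords(chars, pass_len):
--     result = []
--     if pass_len == 0:
--         return result
--     if pass_len == 1:
--         for ch in chars:
--             result.append(ch)
--     else:
--         for ch in chars:
--             for pwords in generate_passwords(chars, pass_len - 1):
--                 result.append(ch)
--                 result.append(ch + pwords)
--     return set(result)
-- ===== SOURCE B (Python) =====
-- def generate_passwords(chars, pass_len):
--     if pass_len == 0:
--         return []
--     uniq = list(dict.fromkeys(chars))
--     level = set(uniq)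
--     for _ in range(pass_len - 1):
--         nxt = []
--         for c in uniq:
--             nxt.append(c)
--             for w in level:
--                 nxt.append(c + w)
--         level = set(nxt)
--     return level
-- ===== Notes on version B (the rewrite author's own statement) =====
-- stated objective: alternative
-- what changed: Replaces A's recursion, which recomputes the whole sub-result once per character and re-deduplicates a duplicate-heavy list at every level, with one bottom-up loop that deduplicates the characters once and builds each level exactly once.
import Mathlib
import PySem

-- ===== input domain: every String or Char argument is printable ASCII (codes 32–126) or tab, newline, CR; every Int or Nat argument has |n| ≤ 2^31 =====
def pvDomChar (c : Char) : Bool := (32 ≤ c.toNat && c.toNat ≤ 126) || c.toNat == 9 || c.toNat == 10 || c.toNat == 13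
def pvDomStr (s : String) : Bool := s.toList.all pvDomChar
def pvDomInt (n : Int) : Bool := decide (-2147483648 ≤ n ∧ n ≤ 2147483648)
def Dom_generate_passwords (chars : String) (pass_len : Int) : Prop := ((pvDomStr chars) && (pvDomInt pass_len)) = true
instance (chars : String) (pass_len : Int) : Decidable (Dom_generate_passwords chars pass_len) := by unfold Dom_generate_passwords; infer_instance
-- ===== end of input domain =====

-- B replaces A's recursion (which recomputes the whole sub-result once per character and
-- re-deduplicates at every level) by one bottom-up loop that deduplicates the characters once
-- and builds each level exactly once.

-- ===== PORT A =====
-- a 1-character Python string 'ch', and the concatenation 'ch + pwords'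
def pvSing (c : Char) : String := String.ofList [c]
def pvCat (c : Char) (w : String) : String := String.ofList (c :: w.toList)

-- A's recursion, on the (nonnegative, by Pre_) pass_len as a Nat
def pvGenA (cs : List Char) : Nat → List String
  | 0 => []
  | 1 => PySem.Set.ofList (cs.foldl (fun r c => r ++ [pvSing c]) ([] : List String))
  | n+2 => PySem.Set.ofList (cs.foldl (fun r c =>
      (pvGenA cs (n+1)).foldl (fun r2 w => (r2 ++ [pvSing c]) ++ [pvCat c w]) r) ([] : List String))

def generate_passwords (chars : String) (pass_len : Int) : List String :=
  if pass_len = 0 then [] else pvGenA chars.toList pass_len.toNat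

-- ===== PORT B =====
-- one loop body: nxt collects c and c + w for every w of the previous level
def pvStep (uniq : List Char) (level : List String) : List String :=
  uniq.foldl (fun nxt c =>
    level.foldl (fun n2 w => n2 ++ [pvCat c w]) (nxt ++ [pvSing c])) []

def generate_passwords_alt (chars : String) (pass_len : Int) : List String :=
  if pass_len = 0 then []
  else
    (PySem.List.pyRange 0 (pass_len - 1) 1).foldl
      (fun lv _ => PySem.Set.ofList (pvStep (PySem.List.dedup chars.toList) lv))
      (PySem.Set.ofList ((PySem.List.dedup chars.toList).map pvSing))

-- ===== PRECONDITION & SPEC =====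
-- A recurses on pass_len - 1 with no base case below 0: on negative pass_len (unless chars is
-- empty, when no recursive call is ever made) it raises RecursionError; Pre_ excludes exactly those inputs.
def Pre_generate_passwords (chars : String) (pass_len : Int) : Prop := 0 ≤ pass_len ∨ chars = ""
instance (chars : String) (pass_len : Int) : Decidable (Pre_generate_passwords chars pass_len) := by
  unfold Pre_generate_passwords; infer_instance

def pvWitness_generate_passwords : String × Int := ("ab", 2)

def Spec_generate_passwords (chars : String) (pass_len : Int) (out : List String) : Prop := out = generate_passwords_alt chars pass_len
instance (chars : String) (pass_len : Int) (out : List String) : Decidable (Spec_generate_passwords chars pass_len out) := by unfold Spec_generate_passwords; infer_instance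

-- ===== CLAIM (what is proved, stated in full; the proofs are below) =====
def Claim_equal_generate_passwords : Prop := ∀ (chars : String) (pass_len : Int), Dom_generate_passwords chars pass_len → Pre_generate_passwords chars pass_len → Spec_generate_passwords chars pass_len (generate_passwords chars pass_len)

-- ===== LEMMAS AND PROOFS =====

-- the state of B's loop after m iterations
def pvP (cs : List Char) (m : Nat) : List String :=
  (pvStep (PySem.List.dedup cs))^[m] ((PySem.List.dedup cs).map pvSing)

theorem pvP_zero (cs : List Char) : pvP cs 0 = (PySem.List.dedup cs).map pvSing := rfl

theorem pvP_succ (cs : List Char) (m : Nat) :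
    pvP cs (m+1) = pvStep (PySem.List.dedup cs) (pvP cs m) :=
  Function.iterate_succ_apply' _ _ _

@[simp] theorem toList_pvSing (c : Char) : (pvSing c).toList = [c] := by
  simp [pvSing, String.toList_ofList]

@[simp] theorem toList_pvCat (c : Char) (w : String) : (pvCat c w).toList = c :: w.toList := by
  simp [pvCat, String.toList_ofList]

theorem pvSing_injective : Function.Injective pvSing := by
  intro a b h
  have h2 := congrArg String.toList h
  simp at h2
  exact h2

theorem pvCat_injective (c : Char) : Function.Injective (pvCat c) := by
  intro a b h
  have h2 := congrArg String.toList h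
  simp at h2
  exact String.toList_inj.mp h2

theorem pvCat_ne_pvSing (c c' : Char) (w : String) (hw : w.toList ≠ []) :
    pvCat c' w ≠ pvSing c := by
  intro h
  have h2 := congrArg String.toList h
  simp at h2
  exact hw (by simp [h2.2])

theorem pvStep_eq (u : List Char) (lv : List String) :
    pvStep u lv = u.flatMap (fun c => pvSing c :: lv.map (pvCat c)) := by
  unfold pvStep
  simp only [PySem.List.foldl_append_singleton_eq_map, List.append_assoc,
    List.singleton_append]
  rw [PySem.List.foldl_append_eq_flatMap]
  simp

-- Nodup of a flatMap whose blocks are pairwise disjoint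
theorem pvNodupFlatMap {α β : Type} (L : List α) (G : α → List β)
    (h2 : ∀ a ∈ L, (G a).Nodup)
    (h3 : L.Pairwise (fun a b => ∀ x ∈ G a, x ∉ G b)) : (L.flatMap G).Nodup := by
  induction L with
  | nil => simp
  | cons a t ih =>
    rw [List.flatMap_cons]
    rw [List.pairwise_cons] at h3
    refine List.Nodup.append (h2 a (by simp)) (ih (fun b hb => h2 b (by simp [hb])) h3.2) ?_
    intro x hx hx'
    obtain ⟨b, hb, hxb⟩ := List.mem_flatMap.mp hx'
    exact (h3.1 b hb x hx) hxb

-- (l.filter q).flatMap G written as a flatMap over l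
theorem pvFlatMapFilter {α β : Type} (q : α → Bool) (l : List α) (G : α → List β) :
    (l.filter q).flatMap G = l.flatMap (fun x => if q x then G x else []) := by
  induction l with
  | nil => rfl
  | cons a t ih =>
    by_cases h : q a = true
    · simp [h, ih]
    · simp only [Bool.not_eq_true] at h
      simp [h, ih]

-- set() of a concatenation of blocks separated by the first character of their elements
theorem pvOfList_flatMap_key (cs : List Char) (g : Char → List String)
    (hk : ∀ c s, s ∈ g c → s.toList.head? = some c) :
    PySem.Set.ofList (cs.flatMap g) =
      (PySem.List.dedup cs).flatMap (fun c => PySem.Set.ofList (g c)) := by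
  induction cs with
  | nil => simp
  | cons c t ih =>
    have hsplit : PySem.List.dedup (c :: t) = c :: PySem.Set.discard (PySem.List.dedup t) c := by
      rw [PySem.List.dedup_eq_ofList, PySem.Set.ofList_cons, ← PySem.List.dedup_eq_ofList]
    rw [List.flatMap_cons, PySem.Set.ofList_append, PySem.Set.update_eq_append_filter, ih]
    rw [hsplit, List.flatMap_cons]
    congr 1
    rw [List.filter_flatMap]
    simp only [PySem.Set.discard]
    rw [pvFlatMapFilter]
    apply List.flatMap_congr
    intro c' _
    split_ifs with hq
    · -- c' ≠ c : the block is kept whole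
      have hcc : c' ≠ c := by simpa using hq
      apply List.filter_eq_self.mpr
      intro y hy
      have hy' : y ∈ g c' := (PySem.Set.mem_ofList _ _).mp hy
      have hyc : y ∉ g c := by
        intro hyc
        have e2 := hk c y hyc
        rw [hk c' y hy'] at e2
        exact hcc (Option.some.inj e2)
      simpa using hyc
    · -- c' = c : every element of the block was already seen
      have hcc : c' = c := by simpa using hq
      subst hcc
      apply List.filter_eq_nil_iff.mpr
      intro y hy
      have hy' : y ∈ g c' := (PySem.Set.mem_ofList _ _).mp hy
      simpa using hy'


theorem pvFoldlInterleave (c : Char) (R : List String) :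
    ∀ s : List String, pvSing c ∈ s → R.Nodup → (∀ w ∈ R, pvCat c w ∉ s) →
    (R.flatMap (fun w => [pvSing c, pvCat c w])).foldl PySem.Set.add s
      = s ++ R.map (pvCat c) := by
  induction R with
  | nil => intro s _ _ _; simp
  | cons w t ih =>
    intro s ha hnd hf
    have hnd' := List.nodup_cons.mp hnd
    rw [List.flatMap_cons]
    simp only [List.cons_append, List.nil_append, List.foldl_cons]
    have h1 : PySem.Set.add s (pvSing c) = s := by
      simp [PySem.Set.add, PySem.Set.contains, ha]
    have h2 : PySem.Set.add s (pvCat c w) = s ++ [pvCat c w] := by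
      simp [PySem.Set.add, PySem.Set.contains,
        hf w (by simp)]
    rw [h1, h2]
    rw [ih (s ++ [pvCat c w]) (by simp [ha]) hnd'.2 ?_]
    · simp
    · intro w' hw'
      simp only [List.mem_append, List.mem_singleton, not_or]
      refine ⟨hf w' (by simp [hw']), ?_⟩
      intro h
      exact hnd'.1 (pvCat_injective c h ▸ hw')

theorem pvOfListInterleave (c : Char) (R : List String) (hnd : R.Nodup)
    (hne : ∀ w ∈ R, w.toList ≠ []) (h0 : R ≠ []) :
    PySem.Set.ofList (R.flatMap (fun w => [pvSing c, pvCat c w]))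
      = pvSing c :: R.map (pvCat c) := by
  cases R with
  | nil => exact absurd rfl h0
  | cons w t =>
    have hnd' := List.nodup_cons.mp hnd
    rw [PySem.Set.ofList_eq_foldl, List.flatMap_cons]
    simp only [List.cons_append, List.nil_append, List.foldl_cons]
    have h1 : PySem.Set.add ([] : List String) (pvSing c) = [pvSing c] := by
      simp [PySem.Set.add, PySem.Set.contains]
    have h2 : PySem.Set.add [pvSing c] (pvCat c w) = [pvSing c, pvCat c w] := by
      simp [PySem.Set.add, PySem.Set.contains,
        pvCat_ne_pvSing c c w (hne w (by simp))]
    rw [h1, h2]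
    rw [pvFoldlInterleave c t [pvSing c, pvCat c w] (by simp) hnd'.2 ?_]
    · simp
    · intro w' hw'
      simp only [List.mem_cons, List.not_mem_nil, or_false, not_or]
      refine ⟨pvCat_ne_pvSing c c w' (hne w' (by simp [hw'])), ?_⟩
      intro h
      exact hnd'.1 (pvCat_injective c h ▸ hw')

theorem pvMemBlockKey (c : Char) (lv : List String) (x : String)
    (hx : x ∈ pvSing c :: lv.map (pvCat c)) : x.toList.head? = some c := by
  rcases List.mem_cons.mp hx with h | h
  · subst h; simp
  · obtain ⟨w, _, rfl⟩ := List.mem_map.mp h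
    simp

theorem pvP_nodup_ne (cs : List Char) (m : Nat) :
    (pvP cs m).Nodup ∧ ∀ s ∈ pvP cs m, s.toList ≠ [] := by
  induction m with
  | zero =>
    rw [pvP_zero]
    constructor
    · exact (PySem.List.nodup_dedup cs).map pvSing_injective
    · intro s hs
      obtain ⟨c, _, rfl⟩ := List.mem_map.mp hs
      simp
  | succ m ih =>
    rw [pvP_succ, pvStep_eq]
    constructor
    · apply pvNodupFlatMap
      · intro c _
        rw [List.nodup_cons]
        constructor
        · intro h
          obtain ⟨w, hw, hww⟩ := List.mem_map.mp h
          exact pvCat_ne_pvSing c c w (ih.2 w hw) hww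
        · exact ih.1.map (pvCat_injective c)
      · have hnd := PySem.List.nodup_dedup cs
        refine List.Pairwise.imp_of_mem ?_ hnd
        intro a b _ _ hab x hxa hxb
        have e1 := pvMemBlockKey a _ x hxa
        have e2 := pvMemBlockKey b _ x hxb
        rw [e1] at e2
        exact hab (Option.some.inj e2)
    · intro s hs
      obtain ⟨c, _, hc⟩ := List.mem_flatMap.mp hs
      rcases List.mem_cons.mp hc with h | h
      · subst h; simp
      · obtain ⟨w, _, rfl⟩ := List.mem_map.mp h
        simp

theorem pvDedup_ne_nil (cs : List Char) (h : cs ≠ []) : PySem.List.dedup cs ≠ [] := by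
  cases cs with
  | nil => exact absurd rfl h
  | cons c t =>
    rw [PySem.List.dedup_eq_ofList]
    exact List.ne_nil_of_mem ((PySem.Set.mem_ofList (c :: t) c).mpr (by simp))

theorem pvP_ne_nil (cs : List Char) (h : cs ≠ []) (m : Nat) : pvP cs m ≠ [] := by
  have hd := pvDedup_ne_nil cs h
  cases m with
  | zero =>
    rw [pvP_zero]
    simpa using hd
  | succ m =>
    rw [pvP_succ, pvStep_eq]
    obtain ⟨c, t, he⟩ := List.exists_cons_of_ne_nil hd
    rw [he, List.flatMap_cons]
    simp

theorem pvInnerFold (R : List String) (r : List String) (c : Char) :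
    R.foldl (fun r2 w => (r2 ++ [pvSing c]) ++ [pvCat c w]) r
      = r ++ R.flatMap (fun w => [pvSing c, pvCat c w]) := by
  simp only [List.append_assoc, List.singleton_append]
  exact PySem.List.foldl_append_eq_flatMap _ _ _

theorem pvOuterFold (cs : List Char) (R : List String) (acc : List String) :
    cs.foldl (fun r c => R.foldl (fun r2 w => (r2 ++ [pvSing c]) ++ [pvCat c w]) r) acc
      = acc ++ cs.flatMap (fun c => R.flatMap (fun w => [pvSing c, pvCat c w])) := by
  induction cs generalizing acc with
  | nil => simp
  | cons c t ihc =>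
    rw [List.foldl_cons, pvInnerFold, ihc, List.flatMap_cons, List.append_assoc]

theorem pvGenA_eq (cs : List Char) (m : Nat) : pvGenA cs (m+1) = pvP cs m := by
  induction m with
  | zero =>
    show pvGenA cs 1 = _
    rw [show pvGenA cs 1 = PySem.Set.ofList (cs.foldl (fun r c => r ++ [pvSing c]) []) from rfl]
    rw [PySem.List.foldl_append_singleton_eq_map, List.nil_append]
    rw [List.map_eq_flatMap]
    rw [pvOfList_flatMap_key cs (fun c => [pvSing c]) (by intro c s hs; simp at hs; simp [hs])]
    rw [pvP_zero, List.map_eq_flatMap]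
    apply List.flatMap_congr
    intro c _
    simp [PySem.Set.ofList_cons, PySem.Set.discard]
  | succ m ih =>
    rw [show pvGenA cs (m+2) = PySem.Set.ofList (cs.foldl (fun r c =>
      (pvGenA cs (m+1)).foldl (fun r2 w => (r2 ++ [pvSing c]) ++ [pvCat c w]) r) []) from rfl]
    rw [ih, pvOuterFold, List.nil_append]
    by_cases hcs : cs = []
    · subst hcs
      simp [pvP_succ, pvStep_eq]
    · rw [pvOfList_flatMap_key cs _ ?_]
      · rw [pvP_succ, pvStep_eq]
        apply List.flatMap_congr
        intro c _
        exact pvOfListInterleave c (pvP cs m) (pvP_nodup_ne cs m).1 (pvP_nodup_ne cs m).2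
          (pvP_ne_nil cs hcs m)
      · intro c s hs
        obtain ⟨w, hw, hsw⟩ := List.mem_flatMap.mp hs
        rcases List.mem_cons.mp hsw with h | h
        · subst h; simp
        · simp at h
          subst h; simp

theorem pvGenA_nil (m : Nat) : pvGenA [] m = [] := by
  match m with
  | 0 => rfl
  | 1 => rfl
  | n+2 => rfl

theorem pvFoldlIgnore {α : Type} (f : α → α) (l : List Int) (i : α) :
    l.foldl (fun acc _ => f acc) i = f^[l.length] i := by
  induction l generalizing i with
  | nil => rfl
  | cons x t ih => simp [List.foldl_cons, ih, Function.iterate_succ_apply]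

-- B's loop state is A's level at every iteration (set() of an already duplicate-free list)
theorem pvIter_eq (cs : List Char) (k : Nat) :
    (fun lv => PySem.Set.ofList (pvStep (PySem.List.dedup cs) lv))^[k]
        (PySem.Set.ofList ((PySem.List.dedup cs).map pvSing)) = pvP cs k := by
  induction k with
  | zero =>
    simpa [pvP_zero] using
      PySem.Set.ofList_eq_self_of_nodup _ (pvP_nodup_ne cs 0).1
  | succ k ih =>
    rw [Function.iterate_succ_apply', ih, ← pvP_succ]
    exact PySem.Set.ofList_eq_self_of_nodup _ (pvP_nodup_ne cs (k+1)).1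

-- ===== VERDICT (by name: the statement is the Claim_ definition above) =====
theorem generate_passwords_spec : Claim_equal_generate_passwords := by
  unfold Claim_equal_generate_passwords
  intro chars pass_len _ hpre
  unfold Spec_generate_passwords generate_passwords generate_passwords_alt
  by_cases h0 : pass_len = 0
  · simp [h0]
  · rw [if_neg h0, if_neg h0]
    rw [pvFoldlIgnore (fun lv => PySem.Set.ofList (pvStep (PySem.List.dedup chars.toList) lv))]
    rw [PySem.List.length_pyRange_one]
    unfold Pre_generate_passwords at hpre
    by_cases hc : chars = ""
    · -- empty chars: both sides are [] for every pass_len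
      subst hc
      have he : ("".toList : List Char) = [] := by decide
      rw [he, pvGenA_nil]
      exact (Function.iterate_fixed (by decide) _).symm
    · have hpos : 0 ≤ pass_len := by
        rcases hpre with h | h
        · exact h
        · exact absurd h hc
      obtain ⟨k, hk⟩ : ∃ k, pass_len.toNat = k + 1 := ⟨(pass_len - 1).toNat, by omega⟩
      rw [hk, pvGenA_eq]
      have hlen : (pass_len - 1 - 0).toNat = k := by omega
      rw [hlen, pvIter_eq]
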